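-- pv_equiv track=rewrite | github.com/wjdqlsdlsp/coding_test_practice | programmers_all_problems/210821_kakaogalho.py | func
-- ===== SOURCE A (Python) =====
-- def split_1(a):
--     count = {"(":0, ")":0}
--     for i, c in enumerate(a):
--         count[c] +=1
--         if count["("] == count[")"]:
--             return a[:i+1], a[i+1:]
--
-- def is_right(u):
--     stack = []
--     for i in u:
--         if len(stack) > 0 and stack[-1] == '(' and i ==')': stack.pop()
--         else: stack.append(i)
--     if len(stack) == 0: return True
--     else: return False
--
-- def change(u):
--     if u is not None: return ['(' if i ==')' else ')' for i in u]
--     else: return []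
--
-- def func(now, a):
--     if len(a) ==0: return now
--
--     u, v = split_1(a)
--     if is_right(u):
--         if len(v) ==0:
--             return now+u
--         else:
--             return func(now+u, v)
--
--     else:
--         return now + ['('] + func([], v) + [')'] + change(u[1:-1])
-- ===== SOURCE B (Python) =====
-- def is_correct(u):
--     depth = 0
--     for c in u:
--         depth = depth + 1 if c == "(" else depth - 1
--         if depth < 0:
--             return False
--     return depth == 0
--
-- def split(a):
--     bal = 0
--     for i, c in enumerate(a):
--         bal = bal + 1 if c == "(" else bal - 1
--         if bal == 0:
--             return a[:i+1], a[i+1:]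
--
-- def solve(a):
--     if not a:
--         return []
--     u, v = split(a)
--     if is_correct(u):
--         return u + solve(v)
--     return ["("] + solve(v) + [")"] + [")" if c == "(" else "(" for c in u[1:-1]]
--
-- def func(now, a):
--     return now + solve(a)
-- ===== Notes on version B (the rewrite author's own statement) =====
-- stated objective: simpler
-- what changed: B replaces A's accumulator-threading recursion by a pure helper solve(a) (func = now + solve(a)), finds the split point with a single +/-1 balance counter instead of a two-entry count dict, and tests correctness with a depth counter that fails early on a negative depth instead of maintaining an explicit stack.
import Mathlib
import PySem

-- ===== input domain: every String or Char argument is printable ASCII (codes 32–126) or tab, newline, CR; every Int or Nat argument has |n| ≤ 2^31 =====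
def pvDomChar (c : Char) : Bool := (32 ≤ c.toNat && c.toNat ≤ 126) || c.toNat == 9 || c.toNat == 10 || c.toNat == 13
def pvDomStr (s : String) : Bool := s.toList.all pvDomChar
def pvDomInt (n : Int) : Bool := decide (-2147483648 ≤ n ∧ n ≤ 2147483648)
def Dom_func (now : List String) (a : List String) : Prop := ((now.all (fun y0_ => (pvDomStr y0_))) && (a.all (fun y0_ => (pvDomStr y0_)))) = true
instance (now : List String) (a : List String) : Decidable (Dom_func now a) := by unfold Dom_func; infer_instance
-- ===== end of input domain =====

-- B replaces the accumulator-passing recursion by a pure helper `solve` (func = now + solve a),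
-- a single ±1 balance counter instead of the two-entry count dict, and a depth counter with an
-- early negative check instead of the explicit stack; same cost, plainer decomposition.


-- ===== PORT A =====
-- split_1: scans a keeping the two counts; returns the slice pair at the first index where the
-- counts agree; Python returns None when the loop exhausts, and raises KeyError on an element
-- that is neither "(" nor ")" — both modelled as `none` (excluded by Pre_func).
def split1Aux (co cc : Int) (seen rest : List String) : Option (List String × List String) :=
  match rest with
  | [] => none
  | c :: rs =>
    if c = "(" ∨ c = ")" then
      if (if c = "(" then co + 1 else co) = (if c = ")" then cc + 1 else cc) then
        some (seen ++ [c], rs)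
      else split1Aux (if c = "(" then co + 1 else co) (if c = ")" then cc + 1 else cc) (seen ++ [c]) rs
    else none

-- is_right: the explicit stack; stack[-1] is the last element, pop removes it.
def stackStep (st : List String) (i : String) : List String :=
  if st ≠ [] ∧ st.getLast? = some "(" ∧ i = ")" then st.dropLast else st ++ [i]

def isRightA (u : List String) : Bool := decide (u.foldl stackStep ([] : List String) = [])

-- change(u) with u a slice (never None here): the comprehension branch.
def changeA (u : List String) : List String := u.map (fun i => if i = ")" then "(" else ")")

-- termination helper for the port (cited by decreasing_by)
theorem split1Aux_len : ∀ (rest : List String) (co cc : Int) (seen u v : List String),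
    split1Aux co cc seen rest = some (u, v) → v.length < rest.length := by
  intro rest
  induction rest with
  | nil => intro co cc seen u v h; simp [split1Aux] at h
  | cons c rs ih =>
    intro co cc seen u v h
    rw [split1Aux] at h
    by_cases hc : c = "(" ∨ c = ")"
    · rw [if_pos hc] at h
      by_cases he : (if c = "(" then co + 1 else co) = (if c = ")" then cc + 1 else cc)
      · rw [if_pos he] at h
        simp only [Option.some.injEq, Prod.mk.injEq] at h
        obtain ⟨-, rfl⟩ := h
        simp
      · rw [if_neg he] at h
        exact Nat.lt_trans (ih _ _ _ _ _ h) (Nat.lt_succ_self _)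
    · rw [if_neg hc] at h; simp at h

-- u[1:-1] is ported as (u.drop 1).dropLast (exact for every list).
def func (now : List String) (a : List String) : List String :=
  if a = [] then now
  else
    match h : split1Aux 0 0 [] a with
    | none => now   -- Python raises TypeError/KeyError here; excluded by Pre_func
    | some (u, v) =>
      if isRightA u then
        if v = [] then now ++ u
        else func (now ++ u) v
      else now ++ ["("] ++ func [] v ++ [")"] ++ changeA ((u.drop 1).dropLast)
termination_by a.length
decreasing_by
  all_goals exact split1Aux_len a 0 0 [] u v h

-- ===== PORT B =====
-- is_correct: a single depth counter with early failure on a negative depth.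
def isCorrect (depth : Int) (u : List String) : Bool :=
  match u with
  | [] => decide (depth = 0)
  | c :: rs =>
    if (if c = "(" then depth + 1 else depth - 1) < 0 then false
    else isCorrect (if c = "(" then depth + 1 else depth - 1) rs

-- the `for … if bal == 0: return` scan; Python's split returns None when the balance never
-- closes (the caller's unpacking then raises TypeError) — modelled as `none` (excluded by Pre_func).
def splitB (bal : Int) (seen rest : List String) : Option (List String × List String) :=
  match rest with
  | [] => none
  | c :: rs =>
    if (if c = "(" then bal + 1 else bal - 1) = 0 then some (seen ++ [c], rs)
    else splitB (if c = "(" then bal + 1 else bal - 1) (seen ++ [c]) rs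

-- termination helper for the port (cited by decreasing_by)
theorem splitB_len : ∀ (rest : List String) (bal : Int) (seen u v : List String),
    splitB bal seen rest = some (u, v) → v.length < rest.length := by
  intro rest
  induction rest with
  | nil => intro bal seen u v h; simp [splitB] at h
  | cons c rs ih =>
    intro bal seen u v h
    rw [splitB] at h
    by_cases he : (if c = "(" then bal + 1 else bal - 1) = 0
    · rw [if_pos he] at h
      simp only [Option.some.injEq, Prod.mk.injEq] at h
      obtain ⟨-, rfl⟩ := h
      simp
    · rw [if_neg he] at h
      exact Nat.lt_trans (ih _ _ _ _ h) (Nat.lt_succ_self _)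

-- u[1:-1] is ported as (u.drop 1).dropLast (exact for every list).
def solve (a : List String) : List String :=
  if a = [] then []
  else
    match h : splitB 0 [] a with
    | none => []   -- Python raises TypeError here; excluded by Pre_func
    | some (u, v) =>
      if isCorrect 0 u then u ++ solve v
      else ["("] ++ solve v ++ [")"] ++
        ((u.drop 1).dropLast.map (fun c => if c = "(" then ")" else "("))
termination_by a.length
decreasing_by
  all_goals exact splitB_len a 0 [] u v h

def func_alt (now : List String) (a : List String) : List String := now ++ solve a

-- ===== PRECONDITION & SPEC =====
-- Pre_func is exactly A's return domain: every element of a is "(" or ")" (anything else raises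
-- KeyError in split_1) and the two parentheses occur equally often (otherwise some recursive
-- split_1 returns None and unpacking raises TypeError).
def Pre_func (now : List String) (a : List String) : Prop :=
  (∀ s ∈ a, s = "(" ∨ s = ")") ∧ a.count "(" = a.count ")"
instance (now : List String) (a : List String) : Decidable (Pre_func now a) := by
  unfold Pre_func; infer_instance

def pvWitness_func : List String × List String := (["x"], ["(", "(", ")", ")", "(", ")"])

def Spec_func (now : List String) (a : List String) (out : List String) : Prop := out = func_alt now a
instance (now : List String) (a : List String) (out : List String) : Decidable (Spec_func now a out) := by unfold Spec_func; infer_instance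

-- ===== CLAIM (what is proved, stated in full; the proofs are below) =====
def Claim_equal_func : Prop := ∀ (now : List String) (a : List String), Dom_func now a → Pre_func now a → Spec_func now a (func now a)

-- ===== LEMMAS AND PROOFS =====

def pw (c : String) : Int := if c = "(" then 1 else -1
def pdiff (l : List String) : Int := (l.map pw).sum
def ParenOnly (l : List String) : Prop := ∀ s ∈ l, s = "(" ∨ s = ")"

theorem pdiff_nil : pdiff [] = 0 := rfl
theorem pdiff_cons (c : String) (l : List String) : pdiff (c :: l) = pw c + pdiff l := by
  simp [pdiff]
theorem pdiff_append (l1 l2 : List String) : pdiff (l1 ++ l2) = pdiff l1 + pdiff l2 := by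
  simp [pdiff]

theorem pdiff_counts : ∀ (a : List String), ParenOnly a →
    pdiff a = (a.count "(" : Int) - (a.count ")" : Int) := by
  intro a
  induction a with
  | nil => intro _; simp [pdiff]
  | cons c rs ih =>
    intro h
    have hrs := ih (fun s hs => h s (List.mem_cons_of_mem _ hs))
    have hc := h c List.mem_cons_self
    rw [pdiff_cons, hrs]
    rcases hc with rfl | rfl <;>
      simp [pw] <;> push_cast <;> ring


-- seen-accumulator irrelevance for splitB
theorem splitB_seen : ∀ (rest : List String) (bal : Int) (s t : List String),
    splitB bal (s ++ t) rest = (splitB bal t rest).map (fun p => (s ++ p.1, p.2)) := by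
  intro rest
  induction rest with
  | nil => intro bal s t; simp [splitB]
  | cons c rs ih =>
    intro bal s t
    rw [splitB, splitB]
    by_cases he : (if c = "(" then bal + 1 else bal - 1) = 0
    · rw [if_pos he, if_pos he]
      simp [List.append_assoc]
    · rw [if_neg he, if_neg he, List.append_assoc]
      exact ih _ s (t ++ [c])

-- splitB finds a genuine decomposition when the balance returns to 0
theorem splitB_spec : ∀ (rest : List String) (bal : Int), rest ≠ [] → bal + pdiff rest = 0 →
    ∃ u v, splitB bal [] rest = some (u, v) ∧ rest = u ++ v ∧
      bal + pdiff u = 0 ∧ u ≠ [] := by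
  intro rest
  induction rest with
  | nil => intro bal h; exact absurd rfl h
  | cons c rs ih =>
    intro bal _ hsum
    rw [pdiff_cons] at hsum
    have hbal : (if c = "(" then bal + 1 else bal - 1) = bal + pw c := by
      simp only [pw]; split <;> ring
    rw [splitB, hbal]
    by_cases h0 : bal + pw c = 0
    · refine ⟨[c], rs, by rw [if_pos h0]; simp, by simp, ?_, by simp⟩
      rw [pdiff_cons, pdiff_nil]
      omega
    · rw [if_neg h0]
      have hrs : rs ≠ [] := fun h => by rw [h, pdiff_nil] at hsum; omega
      obtain ⟨u', v', hsp, hdec, hb, hne⟩ := ih (bal + pw c) hrs (by omega)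
      have hseen : splitB (bal + pw c) [c] rs = some (c :: u', v') := by
        have h1 := splitB_seen rs (bal + pw c) [c] []
        rw [List.append_nil] at h1
        rw [h1, hsp]
        simp
      refine ⟨c :: u', v', by rw [List.nil_append]; exact hseen, by rw [hdec]; simp, ?_, by simp⟩
      rw [show c :: u' = [c] ++ u' from rfl, pdiff_append, pdiff_cons, pdiff_nil]
      omega

-- A's split_1 equals B's scan on paren-only input (both return None in step on exhaustion)
theorem split_eq : ∀ (rest : List String) (co cc : Int) (seen : List String),
    ParenOnly rest → split1Aux co cc seen rest = splitB (co - cc) seen rest := by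
  intro rest
  induction rest with
  | nil => intro co cc seen _; rfl
  | cons c rs ih =>
    intro co cc seen hp
    have hc := hp c List.mem_cons_self
    have hp' : ParenOnly rs := fun s hs => hp s (List.mem_cons_of_mem _ hs)
    have hbal : (if c = "(" then co - cc + 1 else co - cc - 1) = (co - cc) + pw c := by
      simp only [pw]; split <;> ring
    have hdiff : (if c = "(" then co + 1 else co) - (if c = ")" then cc + 1 else cc)
        = (co - cc) + pw c := by
      rcases hc with rfl | rfl
      · rw [if_pos rfl, if_neg (by decide : ¬("(" : String) = ")"),
          show pw "(" = 1 from by decide]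
        ring
      · rw [if_neg (by decide : ¬(")" : String) = "("), if_pos rfl,
          show pw ")" = -1 from by decide]
        ring
    rw [split1Aux, if_pos hc, splitB, hbal]
    by_cases h0 : (co - cc) + pw c = 0
    · have hcond : (if c = "(" then co + 1 else co) = (if c = ")" then cc + 1 else cc) := by omega
      rw [if_pos hcond, if_pos h0]
    · have hcond : ¬ (if c = "(" then co + 1 else co) = (if c = ")" then cc + 1 else cc) := by
        omega
      rw [if_neg hcond, if_neg h0, ih _ _ (seen ++ [c]) hp', hdiff]

-- stack shape invariant: over paren-only input the stack is always  replicate k ")" ++ replicate m "("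
theorem stackStep_shape (k m : ℕ) (c : String) (hc : c = "(" ∨ c = ")") :
    stackStep (List.replicate k ")" ++ List.replicate m "(") c =
      if c = "(" then List.replicate k ")" ++ List.replicate (m + 1) "("
      else if 0 < m then List.replicate k ")" ++ List.replicate (m - 1) "("
      else List.replicate (k + 1) ")" ++ List.replicate 0 "(" := by
  rcases hc with rfl | rfl
  · simp only [stackStep, if_pos]
    rw [if_neg (by simp), List.replicate_succ' (n := m)]
    simp
  · by_cases hm : 0 < m
    · obtain ⟨m', rfl⟩ : ∃ m', m = m' + 1 := ⟨m - 1, by omega⟩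
      simp only [stackStep]
      rw [if_pos]
      · rw [List.replicate_succ' (n := m'), ← List.append_assoc, List.dropLast_concat]
        simp
      · refine ⟨by simp, ?_, by decide⟩
        rw [List.replicate_succ' (n := m'), ← List.append_assoc, List.getLast?_concat]
    · obtain rfl : m = 0 := by omega
      simp only [stackStep]
      rw [if_neg, if_neg (by simp)]
      · simp [List.replicate_succ' (n := k)]
      · rintro ⟨hne, hlast, -⟩
        obtain ⟨k', rfl⟩ : ∃ k', k = k' + 1 := by
          cases k with
          | zero => simp at hne
          | succ k' => exact ⟨k', rfl⟩
        simp only [List.replicate_zero, List.append_nil] at hlast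
        rw [List.replicate_succ' (n := k'), List.getLast?_concat] at hlast
        simp at hlast

-- with k > 0 the stack can never be emptied
theorem stack_stuck : ∀ (u : List String) (k m : ℕ), ParenOnly u → 0 < k →
    ∃ k' m', 0 < k' ∧ u.foldl stackStep (List.replicate k ")" ++ List.replicate m "(")
      = List.replicate k' ")" ++ List.replicate m' "(" := by
  intro u
  induction u with
  | nil => intro k m _ hk; exact ⟨k, m, hk, rfl⟩
  | cons c rs ih =>
    intro k m hp hk
    have hc := hp c List.mem_cons_self
    rw [List.foldl_cons, stackStep_shape k m c hc]
    have hp' : ParenOnly rs := fun s hs => hp s (List.mem_cons_of_mem _ hs)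
    rcases hc with rfl | rfl
    · simpa using ih k (m + 1) hp' hk
    · by_cases hm : 0 < m
      · rw [if_neg (by decide : ¬ (")" : String) = "("), if_pos hm]
        exact ih k (m - 1) hp' hk
      · rw [if_neg (by decide : ¬ (")" : String) = "("), if_neg hm]
        exact ih (k + 1) 0 hp' (by omega)

-- A's stack test from a stack of m open parens equals B's depth test started at depth m
theorem isRight_eq : ∀ (u : List String) (m : ℕ), ParenOnly u →
    decide (u.foldl stackStep (List.replicate m "(") = []) = isCorrect (m : Int) u := by
  intro u
  induction u with
  | nil =>
    intro m _
    simp [isCorrect, List.replicate_eq_nil_iff]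
  | cons c rs ih =>
    intro m hp
    have hc := hp c List.mem_cons_self
    have hp' : ParenOnly rs := fun s hs => hp s (List.mem_cons_of_mem _ hs)
    have hstart : List.replicate m "(" = List.replicate 0 ")" ++ List.replicate m "(" := by simp
    rw [List.foldl_cons, hstart, stackStep_shape 0 m c hc]
    rcases hc with rfl | rfl
    · rw [if_pos rfl,
        show List.replicate 0 ")" ++ List.replicate (m + 1) "(" = List.replicate (m + 1) "(" from
          by simp,
        ih (m + 1) hp', isCorrect, if_pos rfl,
        if_neg (show ¬((m : Int) + 1 < 0) from by omega)]
      norm_cast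
    · rw [if_neg (by decide : ¬ (")" : String) = "(")]
      by_cases hm : 0 < m
      · rw [if_pos hm,
          show List.replicate 0 ")" ++ List.replicate (m - 1) "(" = List.replicate (m - 1) "(" from
            by simp,
          ih (m - 1) hp', isCorrect, if_neg (by decide : ¬ (")" : String) = "("),
          if_neg (show ¬((m : Int) - 1 < 0) from by omega)]
        congr 1
        omega
      · rw [if_neg hm]
        obtain rfl : m = 0 := by omega
        obtain ⟨k', m', hk', hfold⟩ := stack_stuck rs 1 0 hp' (by omega)
        have hfold' : List.foldl stackStep (List.replicate (0 + 1) ")" ++ List.replicate 0 "(") rs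
            = List.replicate k' ")" ++ List.replicate m' "(" := by simpa using hfold
        rw [hfold']
        have hne : List.replicate k' ")" ++ List.replicate m' "(" ≠ ([] : List String) := by
          intro h
          have := congrArg List.length h
          simp [List.length_append] at this
          omega
        rw [decide_eq_false hne, isCorrect, if_neg (by decide : ¬ (")" : String) = "("),
          if_pos (show ((0 : ℕ) : Int) - 1 < 0 from by omega)]

-- the two comprehensions agree on parentheses, and map commutes with tail/dropLast
theorem change_eq (u : List String) (hpu : ParenOnly u) :
    changeA (u.tail.dropLast) = (List.map (fun c => if c = "(" then ")" else "(") u).tail.dropLast := by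
  unfold changeA
  rw [← List.map_tail, ← List.map_dropLast]
  apply List.map_congr_left
  intro s hs
  have hsu : s ∈ u := List.tail_subset _ (List.dropLast_subset _ hs)
  rcases hpu s hsu with rfl | rfl <;> decide

-- the core equivalence: A's accumulator recursion equals now ++ solve a
theorem main_eq : ∀ (n : ℕ) (a now : List String), a.length ≤ n → ParenOnly a → pdiff a = 0 →
    func now a = now ++ solve a := by
  intro n
  induction n with
  | zero =>
    intro a now hlen _ _
    obtain rfl : a = [] := List.eq_nil_of_length_eq_zero (by omega)
    rw [func, solve]
    simp
  | succ n ih =>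
    intro a now hlen hp hd
    by_cases hne : a = []
    · subst hne; rw [func, solve]; simp
    · obtain ⟨u, v, huv, hdecomp, hbalu, hune⟩ := splitB_spec a 0 hne (by omega)
      have hsplit : split1Aux 0 0 [] a = some (u, v) := by
        rw [split_eq a 0 0 [] hp, show (0 : Int) - 0 = 0 from by ring, huv]
      have hpu : ParenOnly u := fun s hs => hp s (hdecomp ▸ List.mem_append_left _ hs)
      have hpv : ParenOnly v := fun s hs => hp s (hdecomp ▸ List.mem_append_right _ hs)
      have hdv : pdiff v = 0 := by
        have := pdiff_append u v
        rw [← hdecomp] at this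
        omega
      have hlv : v.length ≤ n := by
        have h1 := congrArg List.length hdecomp
        simp [List.length_append] at h1
        have h2 : 0 < u.length := List.length_pos_of_ne_nil hune
        omega
      have hright : isRightA u = isCorrect 0 u := by
        have := isRight_eq u 0 hpu
        simpa [isRightA] using this
      have hsolve : solve a = (if isCorrect 0 u then u ++ solve v
          else ["("] ++ solve v ++ [")"] ++
            ((u.drop 1).dropLast.map (fun c => if c = "(" then ")" else "("))) := by
        rw [solve, if_neg hne]
        split
        next heq => rw [huv] at heq; exact absurd heq (by simp)
        next u2 v2 heq =>
          rw [huv] at heq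
          have h1 := Option.some.inj heq
          rw [show u2 = u from (congrArg Prod.fst h1).symm,
            show v2 = v from (congrArg Prod.snd h1).symm]
      have hfunc : func now a = (if isRightA u then
            (if v = [] then now ++ u else func (now ++ u) v)
          else now ++ ["("] ++ func [] v ++ [")"] ++ changeA ((u.drop 1).dropLast)) := by
        rw [func, if_neg hne]
        split
        next heq => rw [hsplit] at heq; exact absurd heq (by simp)
        next u2 v2 heq =>
          rw [hsplit] at heq
          have h1 := Option.some.inj heq
          rw [show u2 = u from (congrArg Prod.fst h1).symm,
            show v2 = v from (congrArg Prod.snd h1).symm]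
      rw [hfunc, hsolve, hright]
      by_cases hcor : isCorrect 0 u = true
      · rw [if_pos hcor, if_pos hcor]
        by_cases hv0 : v = []
        · subst hv0
          rw [if_pos rfl, solve]
          simp
        · rw [if_neg hv0, ih v (now ++ u) hlv hpv hdv]
          simp
      · rw [if_neg hcor, if_neg hcor, ih v [] hlv hpv hdv]
        simp
        exact change_eq u hpu

-- ===== VERDICT (by name: the statement is the Claim_ definition above) =====
theorem func_spec : Claim_equal_func := by
  intro now a _ hpre
  obtain ⟨hp, hcnt⟩ := hpre
  have hd : pdiff a = 0 := by
    rw [pdiff_counts a hp, hcnt]; ring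
  show func now a = func_alt now a
  rw [func_alt, main_eq a.length a now le_rfl hp hd]
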